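-- pv_equiv track=rewrite | github.com/kdungs/adventofcode | 2021/08.py | of
-- ===== SOURCE A (Python) =====
-- def of(xs, size=None, sub=None, nsub=None, neqs=None):
--     if size is not None:
--         xs = [x for x in xs if len(x) == size]
--     if sub is not None:
--         xs = [x for x in xs if sub.issubset(x)]
--     if nsub is not None:
--         xs = [x for x in xs if not nsub.issubset(x)]
--     if neqs is not None:
--         xs = [x for x in xs if not x in neqs]
--     return xs[0]
-- ===== SOURCE B (Python) =====
-- def of(xs, size=None, sub=None, nsub=None, neqs=None):
--     for x in xs:
--         if ((size is None or len(x) == size)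
--                 and (sub is None or sub.issubset(x))
--                 and (nsub is None or not nsub.issubset(x))
--                 and (neqs is None or x not in neqs)):
--             return x
--     raise IndexError('list index out of range')
-- ===== Notes on version B (the rewrite author's own statement) =====
-- stated objective: simpler
-- what changed: Replaces A's four sequential list-building filter passes with a single early-exit scan that tests all active conditions per element and returns the first match.
import Mathlib
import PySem

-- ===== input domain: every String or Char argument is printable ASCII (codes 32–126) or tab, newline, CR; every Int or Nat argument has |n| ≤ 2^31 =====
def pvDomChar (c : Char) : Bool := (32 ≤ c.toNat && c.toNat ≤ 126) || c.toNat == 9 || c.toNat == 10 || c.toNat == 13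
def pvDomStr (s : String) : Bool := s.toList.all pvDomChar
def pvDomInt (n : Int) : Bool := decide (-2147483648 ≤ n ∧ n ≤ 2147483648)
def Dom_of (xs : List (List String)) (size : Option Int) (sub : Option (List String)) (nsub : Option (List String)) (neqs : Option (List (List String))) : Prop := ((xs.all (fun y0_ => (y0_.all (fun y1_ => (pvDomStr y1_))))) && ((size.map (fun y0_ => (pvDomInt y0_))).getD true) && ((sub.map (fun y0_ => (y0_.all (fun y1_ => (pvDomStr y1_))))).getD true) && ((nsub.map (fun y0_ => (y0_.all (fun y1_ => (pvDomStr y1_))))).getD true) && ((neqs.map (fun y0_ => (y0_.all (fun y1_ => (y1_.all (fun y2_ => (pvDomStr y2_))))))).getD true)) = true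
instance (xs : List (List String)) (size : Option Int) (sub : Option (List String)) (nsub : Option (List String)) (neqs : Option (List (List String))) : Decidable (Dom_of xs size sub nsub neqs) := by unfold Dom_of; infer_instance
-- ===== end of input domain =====

-- B replaces A's four sequential filter passes by a single early-exit scan (objective: simpler).
-- Python sets are represented as lists of distinct elements: issubset = all-membership,
-- set equality ('x in neqs') = mutual subset.

-- shared primitives for Python set operations (used by both ports and Pre_)
def pyIssubset (s x : List String) : Bool := s.all (fun c => x.contains c)
def pySetEq (a b : List String) : Bool := pyIssubset a b && pyIssubset b a

-- ===== PORT A =====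
-- the conditional pass 'if o is not None: xs = [x for x in xs if c(o, x)]'
def optFilter {β : Type} (o : Option β) (c : β → List String → Bool) (l : List (List String)) : List (List String) :=
  match o with
  | none => l
  | some s => l.filter (c s)

-- literal transliteration: four conditional filter passes, then xs[0]
def of (xs : List (List String)) (size : Option Int) (sub : Option (List String)) (nsub : Option (List String)) (neqs : Option (List (List String))) : List String :=
  let xs1 := optFilter size (fun s x => (x.length : Int) == s) xs
  let xs2 := optFilter sub (fun s x => pyIssubset s x) xs1
  let xs3 := optFilter nsub (fun s x => !pyIssubset s x) xs2
  let xs4 := optFilter neqs (fun l x => !(l.any (fun y => pySetEq x y))) xs3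
  (PySem.List.pyGet? xs4 0).getD []   -- xs[0]; IndexError (none) excluded by Pre_of

-- ===== PORT B =====
-- Source B: one scan, testing all active clauses per element, return the first match;
-- the raise on no match corresponds to the [] result, excluded by Pre_of
def of_alt (xs : List (List String)) (size : Option Int) (sub : Option (List String)) (nsub : Option (List String)) (neqs : Option (List (List String))) : List String :=
  match xs with
  | [] => []
  | x :: rest =>
    if (size.all (fun s => (x.length : Int) == s))
        && (sub.all (fun s => pyIssubset s x))
        && (nsub.all (fun s => !pyIssubset s x))
        && (neqs.all (fun l => !(l.any (fun y => pySetEq x y)))) then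
      x
    else
      of_alt rest size sub nsub neqs

-- ===== PRECONDITION & SPEC =====
-- Pre_of: some element of xs passes all four active conditions — exactly where A's
-- final filtered list is nonempty, i.e. where Python A returns instead of raising IndexError.
def Pre_of (xs : List (List String)) (size : Option Int) (sub : Option (List String)) (nsub : Option (List String)) (neqs : Option (List (List String))) : Prop :=
  (xs.any (fun x =>
    (size.all (fun s => (x.length : Int) == s))
      && (sub.all (fun s => pyIssubset s x))
      && (nsub.all (fun s => !pyIssubset s x))
      && (neqs.all (fun l => !(l.any (fun y => pySetEq x y)))))) = true
instance (xs : List (List String)) (size : Option Int) (sub : Option (List String)) (nsub : Option (List String)) (neqs : Option (List (List String))) : Decidable (Pre_of xs size sub nsub neqs) := by unfold Pre_of; infer_instance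

def pvWitness_of : List (List String) × Option Int × Option (List String) × Option (List String) × Option (List (List String)) := ([["a"]], none, none, none, none)

def Spec_of (xs : List (List String)) (size : Option Int) (sub : Option (List String)) (nsub : Option (List String)) (neqs : Option (List (List String))) (out : List String) : Prop := out = of_alt xs size sub nsub neqs
instance (xs : List (List String)) (size : Option Int) (sub : Option (List String)) (nsub : Option (List String)) (neqs : Option (List (List String))) (out : List String) : Decidable (Spec_of xs size sub nsub neqs out) := by unfold Spec_of; infer_instance

-- ===== CLAIM (what is proved, stated in full; the proofs are below) =====
def Claim_equal_of : Prop := ∀ (xs : List (List String)) (size : Option Int) (sub : Option (List String)) (nsub : Option (List String)) (neqs : Option (List (List String))), Dom_of xs size sub nsub neqs → Pre_of xs size sub nsub neqs → Spec_of xs size sub nsub neqs (of xs size sub nsub neqs)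

-- ===== LEMMAS AND PROOFS =====

-- the combined per-element predicate, in B's clause order
def pvKeep (size : Option Int) (sub : Option (List String)) (nsub : Option (List String)) (neqs : Option (List (List String))) (x : List String) : Bool :=
  (size.all (fun s => (x.length : Int) == s))
    && (sub.all (fun s => pyIssubset s x))
    && (nsub.all (fun s => !pyIssubset s x))
    && (neqs.all (fun l => !(l.any (fun y => pySetEq x y))))

-- an optional filter pass is a filter by the option-lifted condition
theorem pv_optFilter {β : Type} (o : Option β) (c : β → List String → Bool) (l : List (List String)) :
    optFilter o c l = l.filter (fun x => o.all (fun s => c s x)) := by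
  cases o <;> simp [optFilter]

theorem pv_of_eq_filter (xs : List (List String)) (size : Option Int) (sub : Option (List String)) (nsub : Option (List String)) (neqs : Option (List (List String))) :
    of xs size sub nsub neqs = ((xs.filter (pvKeep size sub nsub neqs))[0]?).getD [] := by
  unfold of
  simp only [pv_optFilter]
  simp only [List.filter_filter, PySem.List.pyGet?_zero]
  congr 2
  apply List.filter_congr
  intro x _
  unfold pvKeep
  cases size.all (fun s => (x.length : Int) == s) <;>
    cases sub.all (fun s => pyIssubset s x) <;>
    cases nsub.all (fun s => !pyIssubset s x) <;>
    cases neqs.all (fun l => !(l.any (fun y => pySetEq x y))) <;> rfl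

theorem pv_of_alt_eq_filter (xs : List (List String)) (size : Option Int) (sub : Option (List String)) (nsub : Option (List String)) (neqs : Option (List (List String))) :
    of_alt xs size sub nsub neqs = ((xs.filter (pvKeep size sub nsub neqs))[0]?).getD [] := by
  induction xs with
  | nil => rfl
  | cons x rest ih =>
    unfold of_alt
    by_cases h : pvKeep size sub nsub neqs x = true
    · have h' := h; unfold pvKeep at h'
      simp [List.filter_cons, h, h']
    · have h' := h; unfold pvKeep at h'
      simp only [List.filter_cons, h, if_neg]
      simp only [Bool.not_eq_true] at h'
      rw [if_neg (by simp [h']), ih]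
      simp [h]

-- ===== VERDICT (by name: the statement is the Claim_ definition above) =====
theorem of_spec : Claim_equal_of := by
  intro xs size sub nsub neqs _ _
  unfold Spec_of
  rw [pv_of_eq_filter, pv_of_alt_eq_filter]
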